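-- pv_equiv track=rewrite | github.com/Brandon7771066/TI-Sigma-New | mobile_content_hub.py | _categorize_paper
-- ===== SOURCE A (Python) =====
-- def _categorize_paper(filename: str) -> str:
--     """Categorize paper by topic"""
--     fn = filename.lower()
--
--     if any(x in fn for x in ['ethics', 'inequality', 'invitation']):
--         return "Ethics & Philosophy"
--     elif any(x in fn for x in ['cancer', 'cure', 'disease', 'medical', 'therapeutic', 'treatment']):
--         return "Medical & Therapeutic"
--     elif any(x in fn for x in ['autism', 'schizophrenia', 'mental', 'psychiatric', 'imprinted_brain']):
--         return "Mental Health & Neurodiversity"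
--     elif any(x in fn for x in ['gile', 'consciousness', 'i_cell', 'icell', 'soul']):
--         return "Consciousness & GILE"
--     elif any(x in fn for x in ['tralse', 'myrion', 'logic', 'axiom']):
--         return "Tralse Logic & Myrion"
--     elif any(x in fn for x in ['quantum', 'physics', 'time', 'ccc', 'plasma', 'double_slit', 'mit']):
--         return "Physics & Quantum"
--     elif any(x in fn for x in ['psi', 'psychic', 'intuition']):
--         return "PSI & Intuition"
--     elif any(x in fn for x in ['math', 'number', 'euler', 'riemann', 'ternary', 'calculus', 'velocity', 'acceleration']):
--         return "Mathematics"
--     elif any(x in fn for x in ['bio', 'eeg', 'heart', 'faah', 'neural', 'csf', 'amrita', 'anandamide', 'bliss']):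
--         return "Biometrics & Neuroscience"
--     elif any(x in fn for x in ['solar', 'sun', 'stellar', 'helio', 'star', 'de_photon']):
--         return "Stellar Consciousness"
--     elif any(x in fn for x in ['ai_delusion', 'chatbot', 'echo_chamber']):
--         return "Epistemology & AI"
--     elif any(x in fn for x in ['music', 'art', 'creative']):
--         return "Music & Art"
--     elif any(x in fn for x in ['business', 'stock', 'trading', 'algorithm']):
--         return "Business & Finance"
--     elif any(x in fn for x in ['outreach', 'pitch', 'elevator']):
--         return "Outreach & Strategy"
--     elif any(x in fn for x in ['tralse_manifestation', 'real_world', 'optical', 'illusion', 'mobius', 'klein', 'magic_trick', 'spider_web']):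
--         return "Real-World Tralse"
--     else:
--         return "Core Theory"
-- ===== SOURCE B (Python) =====
-- _RULES = [
--     ("Ethics & Philosophy", ['ethics', 'inequality', 'invitation']),
--     ("Medical & Therapeutic", ['cancer', 'cure', 'disease', 'medical', 'therapeutic', 'treatment']),
--     ("Mental Health & Neurodiversity", ['autism', 'schizophrenia', 'mental', 'psychiatric', 'imprinted_brain']),
--     ("Consciousness & GILE", ['gile', 'consciousness', 'i_cell', 'icell', 'soul']),
--     ("Tralse Logic & Myrion", ['tralse', 'myrion', 'logic', 'axiom']),
--     ("Physics & Quantum", ['quantum', 'physics', 'time', 'ccc', 'plasma', 'double_slit', 'mit']),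
--     ("PSI & Intuition", ['psi', 'psychic', 'intuition']),
--     ("Mathematics", ['math', 'number', 'euler', 'riemann', 'ternary', 'calculus', 'velocity', 'acceleration']),
--     ("Biometrics & Neuroscience", ['bio', 'eeg', 'heart', 'faah', 'neural', 'csf', 'amrita', 'anandamide', 'bliss']),
--     ("Stellar Consciousness", ['solar', 'sun', 'stellar', 'helio', 'star', 'de_photon']),
--     ("Epistemology & AI", ['ai_delusion', 'chatbot', 'echo_chamber']),
--     ("Music & Art", ['music', 'art', 'creative']),
--     ("Business & Finance", ['business', 'stock', 'trading', 'algorithm']),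
--     ("Outreach & Strategy", ['outreach', 'pitch', 'elevator']),
--     ("Real-World Tralse", ['tralse_manifestation', 'real_world', 'optical', 'illusion', 'mobius', 'klein', 'magic_trick', 'spider_web']),
-- ]
--
-- # Flat keyword map: keyword -> (priority, category).  The function no longer
-- # walks categories in order with an early return; it computes, over ALL
-- # keywords at once, the minimum-priority match (argmin aggregation).
-- _KEYWORD_MAP = {k: (i, cat) for i, (cat, ks) in enumerate(_RULES) for k in ks}
--
--
-- def _categorize_paper(filename: str) -> str:
--     """Categorize paper by topic"""
--     fn = filename.lower()
--     best = (len(_RULES), "Core Theory")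
--     for kw, entry in _KEYWORD_MAP.items():
--         if entry[0] < best[0] and kw in fn:
--             best = entry
--     return best[1]
-- ===== Notes on version B (the rewrite author's own statement) =====
-- stated objective: alternative
-- what changed: Replaces the ordered 15-branch elif chain (first-match with early return) by a flattened keyword->(priority,category) map scanned once while keeping the minimum-priority match (argmin aggregation, no short-circuit); correctness: the first matching group in A's chain is exactly the matching keyword of minimum group index.
import Mathlib
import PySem

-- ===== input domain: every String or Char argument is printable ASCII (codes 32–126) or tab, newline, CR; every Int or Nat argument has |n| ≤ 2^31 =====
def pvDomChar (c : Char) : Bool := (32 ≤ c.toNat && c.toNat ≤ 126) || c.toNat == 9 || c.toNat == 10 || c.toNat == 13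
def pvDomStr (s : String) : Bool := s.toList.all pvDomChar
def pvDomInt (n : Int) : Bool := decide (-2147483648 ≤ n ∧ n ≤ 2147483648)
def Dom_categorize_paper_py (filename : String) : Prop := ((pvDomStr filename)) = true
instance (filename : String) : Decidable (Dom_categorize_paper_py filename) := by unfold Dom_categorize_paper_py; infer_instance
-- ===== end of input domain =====

-- B replaces A's ordered first-match elif chain by a single argmin scan over a flattened
-- keyword -> (priority, category) map (no early return); objective: alternative.

-- ===== PORT A =====
def categorize_paper_py (filename : String) : String :=
  let fn := PySem.Str.lower filename
  if (["ethics", "inequality", "invitation"] : List String).any (fun x => PySem.Str.isIn x fn) then "Ethics & Philosophy"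
    else if (["cancer", "cure", "disease", "medical", "therapeutic", "treatment"] : List String).any (fun x => PySem.Str.isIn x fn) then "Medical & Therapeutic"
    else if (["autism", "schizophrenia", "mental", "psychiatric", "imprinted_brain"] : List String).any (fun x => PySem.Str.isIn x fn) then "Mental Health & Neurodiversity"
    else if (["gile", "consciousness", "i_cell", "icell", "soul"] : List String).any (fun x => PySem.Str.isIn x fn) then "Consciousness & GILE"
    else if (["tralse", "myrion", "logic", "axiom"] : List String).any (fun x => PySem.Str.isIn x fn) then "Tralse Logic & Myrion"
    else if (["quantum", "physics", "time", "ccc", "plasma", "double_slit", "mit"] : List String).any (fun x => PySem.Str.isIn x fn) then "Physics & Quantum"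
    else if (["psi", "psychic", "intuition"] : List String).any (fun x => PySem.Str.isIn x fn) then "PSI & Intuition"
    else if (["math", "number", "euler", "riemann", "ternary", "calculus", "velocity", "acceleration"] : List String).any (fun x => PySem.Str.isIn x fn) then "Mathematics"
    else if (["bio", "eeg", "heart", "faah", "neural", "csf", "amrita", "anandamide", "bliss"] : List String).any (fun x => PySem.Str.isIn x fn) then "Biometrics & Neuroscience"
    else if (["solar", "sun", "stellar", "helio", "star", "de_photon"] : List String).any (fun x => PySem.Str.isIn x fn) then "Stellar Consciousness"
    else if (["ai_delusion", "chatbot", "echo_chamber"] : List String).any (fun x => PySem.Str.isIn x fn) then "Epistemology & AI"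
    else if (["music", "art", "creative"] : List String).any (fun x => PySem.Str.isIn x fn) then "Music & Art"
    else if (["business", "stock", "trading", "algorithm"] : List String).any (fun x => PySem.Str.isIn x fn) then "Business & Finance"
    else if (["outreach", "pitch", "elevator"] : List String).any (fun x => PySem.Str.isIn x fn) then "Outreach & Strategy"
    else if (["tralse_manifestation", "real_world", "optical", "illusion", "mobius", "klein", "magic_trick", "spider_web"] : List String).any (fun x => PySem.Str.isIn x fn) then "Real-World Tralse"
  else "Core Theory"

-- ===== PORT B =====
-- _RULES of Source B
def pvRules : List (String × List String) := [
  ("Ethics & Philosophy", ["ethics", "inequality", "invitation"]),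
  ("Medical & Therapeutic", ["cancer", "cure", "disease", "medical", "therapeutic", "treatment"]),
  ("Mental Health & Neurodiversity", ["autism", "schizophrenia", "mental", "psychiatric", "imprinted_brain"]),
  ("Consciousness & GILE", ["gile", "consciousness", "i_cell", "icell", "soul"]),
  ("Tralse Logic & Myrion", ["tralse", "myrion", "logic", "axiom"]),
  ("Physics & Quantum", ["quantum", "physics", "time", "ccc", "plasma", "double_slit", "mit"]),
  ("PSI & Intuition", ["psi", "psychic", "intuition"]),
  ("Mathematics", ["math", "number", "euler", "riemann", "ternary", "calculus", "velocity", "acceleration"]),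
  ("Biometrics & Neuroscience", ["bio", "eeg", "heart", "faah", "neural", "csf", "amrita", "anandamide", "bliss"]),
  ("Stellar Consciousness", ["solar", "sun", "stellar", "helio", "star", "de_photon"]),
  ("Epistemology & AI", ["ai_delusion", "chatbot", "echo_chamber"]),
  ("Music & Art", ["music", "art", "creative"]),
  ("Business & Finance", ["business", "stock", "trading", "algorithm"]),
  ("Outreach & Strategy", ["outreach", "pitch", "elevator"]),
  ("Real-World Tralse", ["tralse_manifestation", "real_world", "optical", "illusion", "mobius", "klein", "magic_trick", "spider_web"])]

-- _KEYWORD_MAP of Source B: {k: (i, cat) for i, (cat, ks) in enumerate(_RULES) for k in ks}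
def pvKeywordMap : List (String × Int × String) :=
  (PySem.List.enumerate pvRules).flatMap (fun ic => ic.2.2.map (fun k => (k, ic.1, ic.2.1)))

-- body of Source B's 'for' loop: keep the entry if it beats the best priority and matches
def pvStep (fn : String) (best : Int × String) (e : String × Int × String) : Int × String :=
  if e.2.1 < best.1 ∧ PySem.Str.isIn e.1 fn then e.2 else best

def categorize_paper_py_alt (filename : String) : String :=
  let fn := PySem.Str.lower filename
  (pvKeywordMap.foldl (pvStep fn) ((15 : Int), "Core Theory")).2

-- ===== PRECONDITION & SPEC =====
def Spec_categorize_paper_py (filename : String) (out : String) : Prop := out = categorize_paper_py_alt filename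
instance (filename : String) (out : String) : Decidable (Spec_categorize_paper_py filename out) := by unfold Spec_categorize_paper_py; infer_instance

-- ===== CLAIM (what is proved, stated in full; the proofs are below) =====
def Claim_equal_categorize_paper_py : Prop := ∀ (filename : String), Dom_categorize_paper_py filename → Spec_categorize_paper_py filename (categorize_paper_py filename)

-- ===== LEMMAS AND PROOFS =====

-- proof-only helpers: the flattened entries of a rules list enumerated from s,
-- and the first-match reading of a rules list (A's elif chain in loop form)
def pvEntriesOf (rules : List (String × List String)) (s : Int) : List (String × Int × String) :=
  (PySem.List.enumerate rules s).flatMap (fun ic => ic.2.2.map (fun k => (k, ic.1, ic.2.1)))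

theorem pvEntriesOf_cons (cat : String) (ks : List String) (rest : List (String × List String)) (s : Int) :
    pvEntriesOf ((cat, ks) :: rest) s
      = (ks.map (fun k => (k, s, cat))) ++ pvEntriesOf rest (s + 1) := by
  simp [pvEntriesOf, PySem.List.enumerate_cons]

def pvFirst (rules : List (String × List String)) (fn : String) (d : String) : String :=
  match rules with
  | [] => d
  | (cat, ks) :: rest => if (ks.any (fun x => PySem.Str.isIn x fn)) = true then cat else pvFirst rest fn d

-- folding pvStep over one category block of priority p: the accumulator drops to (p, c)
-- exactly when p beats the current best and some keyword of the block occurs in fn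
theorem pvFoldGroup (fn : String) (p : Int) (c : String) (ks : List String) (b : Int × String) :
    (ks.map (fun k => (k, p, c))).foldl (pvStep fn) b
      = if p < b.1 ∧ (ks.any (fun x => PySem.Str.isIn x fn)) = true then (p, c) else b := by
  induction ks generalizing b with
  | nil => simp
  | cons k ks ih =>
    simp only [List.map_cons, List.foldl_cons, List.any_cons, pvStep]
    rw [ih]
    by_cases hk : PySem.Chars.isIn k.toList fn.toList = true
    · by_cases hp : p < b.1
      · simp [hk, hp]
      · simp [hk, hp]
    · simp [hk]

-- once the best priority is ≤ every remaining priority, the fold is inert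
theorem pvFoldDead (fn : String) (rules : List (String × List String)) :
    ∀ (s : Int) (b : Int × String), b.1 ≤ s →
      (pvEntriesOf rules s).foldl (pvStep fn) b = b := by
  induction rules with
  | nil => intro s b _; simp [pvEntriesOf, PySem.List.enumerate_nil]
  | cons r rest ih =>
    intro s b hb
    obtain ⟨cat, ks⟩ := r
    rw [pvEntriesOf_cons, List.foldl_append, pvFoldGroup,
      if_neg (fun h => absurd h.1 (by omega))]
    exact ih (s + 1) b (by omega)

-- with room left (every remaining priority below the current best), the fold
-- computes exactly the first matching category
theorem pvFoldFirst (fn : String) (rules : List (String × List String)) :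
    ∀ (s : Int) (b : Int × String), s + rules.length ≤ b.1 →
      ((pvEntriesOf rules s).foldl (pvStep fn) b).2 = pvFirst rules fn b.2 := by
  induction rules with
  | nil => intro s b _; simp [pvEntriesOf, PySem.List.enumerate_nil, pvFirst]
  | cons r rest ih =>
    intro s b hb
    obtain ⟨cat, ks⟩ := r
    simp only [List.length_cons] at hb
    rw [pvEntriesOf_cons, List.foldl_append, pvFoldGroup]
    have hs : s < b.1 := by omega
    by_cases hany : (ks.any (fun x => PySem.Str.isIn x fn)) = true
    · rw [if_pos ⟨hs, hany⟩,
        pvFoldDead fn rest (s + 1) (s, cat) (by omega)]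
      simp only [pvFirst]
      rw [if_pos hany]
    · rw [if_neg (fun h => hany h.2), ih (s + 1) b (by omega)]
      simp only [pvFirst]
      rw [if_neg hany]

-- ===== VERDICT (by name: the statement is the Claim_ definition above) =====
theorem categorize_paper_py_spec : Claim_equal_categorize_paper_py := by
  intro filename _
  unfold Spec_categorize_paper_py categorize_paper_py_alt
  show categorize_paper_py filename
      = ((pvEntriesOf pvRules 0).foldl (pvStep (PySem.Str.lower filename)) ((15 : Int), "Core Theory")).2
  rw [pvFoldFirst (PySem.Str.lower filename) pvRules 0 ((15 : Int), "Core Theory") (by norm_num [pvRules])]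
  rfl
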